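-- pv_equiv track=rewrite | github.com/MapleBloom/First-projects | demotivator_game_X0/Demotivator Game X0.py | draw_check
-- ===== SOURCE A (Python) =====
-- def draw_check(board):
--     # For X and 0 check absence of possibility to fill diagonal, horizontal or vertical. If True -> draw.
--     if sum(1 for i in range(3) for j in range(3) if board[i][j] == ' ') == 0:
--         return True
--     for symb in ['0', 'X']:
--         if sum(1 for i in range(3) if board[i][i] == symb or board[i][i] == ' ') == 3 \
--                 or sum(1 for i in range(3) if board[i][2-i] == symb or board[i][2-i] == ' ') == 3:
--             return False
--         for i in range(3):
--             if sum(1 for j in range(3) if board[i][j] == symb or board[i][j] == ' ') == 3: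
--                 return False
--         for j in range(3):
--             if sum(1 for i in range(3) if board[i][j] == symb or board[i][j] == ' ') == 3:
--                 return False
--     return True
-- ===== SOURCE B (Python) =====
-- def draw_check(board):
--     # Single cell-centric pass: for each non-blank cell, mark the lines through it
--     # as dead for the symbols the cell is not; draw iff board full or all 8 lines
--     # are dead for both symbols (no line can still be completed by either player).
--     blanks = 0
--     dead0 = 0  # bitmask over the 8 lines: line cannot be won by '0'
--     deadX = 0  # bitmask over the 8 lines: line cannot be won by 'X'
--     for i in range(3):
--         for j in range(3):
--             c = board[i][j]
--             if c == ' ':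
--                 blanks += 1
--             else:
--                 bits = (1 << i) | (1 << (3 + j))
--                 if i == j:
--                     bits |= 1 << 6
--                 if i + j == 2:
--                     bits |= 1 << 7
--                 if c != '0':
--                     dead0 |= bits
--                 if c != 'X':
--                     deadX |= bits
--     return blanks == 0 or (dead0 == 255 and deadX == 255)
-- ===== Notes on version B (the rewrite author's own statement) =====
-- stated objective: alternative
-- what changed: Replaces A's line-centric algorithm (four separate per-symbol counting loops over diagonal, anti-diagonal, rows and columns with early returns) with a single cell-centric pass that accumulates, in two 8-bit line bitmasks, which lines are already dead for each symbol, plus a blank counter; draw iff no blanks or both masks are full.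
import Mathlib
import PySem

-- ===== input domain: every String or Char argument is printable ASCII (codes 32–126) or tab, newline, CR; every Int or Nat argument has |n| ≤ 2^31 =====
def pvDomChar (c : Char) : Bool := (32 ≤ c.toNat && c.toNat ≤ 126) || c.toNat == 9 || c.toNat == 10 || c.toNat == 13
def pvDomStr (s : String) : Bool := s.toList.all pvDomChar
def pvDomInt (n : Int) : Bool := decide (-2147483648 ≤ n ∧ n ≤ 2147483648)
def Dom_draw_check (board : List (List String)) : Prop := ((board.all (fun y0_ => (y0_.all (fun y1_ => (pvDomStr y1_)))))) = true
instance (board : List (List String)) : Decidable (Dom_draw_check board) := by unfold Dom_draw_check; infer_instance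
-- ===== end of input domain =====

-- B replaces A's four line-centric per-symbol counting loops with ONE cell-centric
-- pass accumulating dead-line bitmasks (a different decomposition, same O(1) cost).

-- ===== PORT A =====
-- board[i][j]; the default "" only fires outside Pre_draw_check (Python raises IndexError there)
def pvCellA (board : List (List String)) (i j : Int) : String :=
  (PySem.List.pyGet? ((PySem.List.pyGet? board i).getD []) j).getD ""

-- the 'for symb in ['0','X']' loop with its early 'return False's
def pvSymbLoop (board : List (List String)) : List String → Bool
  | [] => true
  | symb :: rest =>
    if ((PySem.List.pyRange 0 3 1).foldl (fun acc i =>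
          if pvCellA board i i == symb || pvCellA board i i == " " then acc + 1 else acc) (0:Int)) == 3
       || ((PySem.List.pyRange 0 3 1).foldl (fun acc i =>
          if pvCellA board i (2-i) == symb || pvCellA board i (2-i) == " " then acc + 1 else acc) (0:Int)) == 3 then
      false
    else if (PySem.List.pyRange 0 3 1).any (fun i =>
        ((PySem.List.pyRange 0 3 1).foldl (fun acc j =>
          if pvCellA board i j == symb || pvCellA board i j == " " then acc + 1 else acc) (0:Int)) == 3) then
      false
    else if (PySem.List.pyRange 0 3 1).any (fun j =>
        ((PySem.List.pyRange 0 3 1).foldl (fun acc i =>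
          if pvCellA board i j == symb || pvCellA board i j == " " then acc + 1 else acc) (0:Int)) == 3) then
      false
    else pvSymbLoop board rest

def draw_check (board : List (List String)) : Bool :=
  if ((PySem.List.pyRange 0 3 1).foldl (fun acc i =>
        (PySem.List.pyRange 0 3 1).foldl (fun acc2 j =>
          if pvCellA board i j == " " then acc2 + 1 else acc2) acc) (0:Int)) == 0 then
    true
  else
    pvSymbLoop board ["0", "X"]

-- ===== PORT B =====
def pvCellB (board : List (List String)) (i j : Int) : String :=
  (PySem.List.pyGet? ((PySem.List.pyGet? board i).getD []) j).getD ""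

-- one iteration of B's cell loop: updates (blanks, dead0, deadX) from cell (i, j)
def pvStepB (board : List (List String)) (st : Int × Int × Int) (i j : Int) : Int × Int × Int :=
  let c := pvCellB board i j
  if c == " " then
    (st.1 + 1, st.2.1, st.2.2)
  else
    let bits0 : Int := Int.lor (Int.shiftLeft 1 i.toNat) (Int.shiftLeft 1 (3 + j).toNat)
    let bits1 : Int := if i == j then Int.lor bits0 (Int.shiftLeft 1 (6:Nat)) else bits0
    let bits : Int := if i + j == 2 then Int.lor bits1 (Int.shiftLeft 1 (7:Nat)) else bits1
    (st.1,
     (if !(c == "0") then Int.lor st.2.1 bits else st.2.1),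
     (if !(c == "X") then Int.lor st.2.2 bits else st.2.2))

def draw_check_alt (board : List (List String)) : Bool :=
  let st := (PySem.List.pyRange 0 3 1).foldl (fun st1 i =>
      (PySem.List.pyRange 0 3 1).foldl (fun st2 j => pvStepB board st2 i j) st1)
    ((0:Int), (0:Int), (0:Int))
  (st.1 == 0) || (st.2.1 == 255 && st.2.2 == 255)

-- ===== PRECONDITION & SPEC =====
-- Pre_ excludes exactly the boards on which Python A raises IndexError (fewer than
-- 3 rows, or one of the first 3 rows shorter than 3 cells); A returns on all others.
def Pre_draw_check (board : List (List String)) : Prop :=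
  3 ≤ board.length ∧ ∀ row ∈ board.take 3, 3 ≤ row.length
instance (board : List (List String)) : Decidable (Pre_draw_check board) := by
  unfold Pre_draw_check; infer_instance

def pvWitness_draw_check : List (List String) :=
  [["X", "0", " "], [" ", "X", "0"], ["0", " ", "X"]]

def Spec_draw_check (board : List (List String)) (out : Bool) : Prop := out = draw_check_alt board
instance (board : List (List String)) (out : Bool) : Decidable (Spec_draw_check board out) := by unfold Spec_draw_check; infer_instance

-- ===== CLAIM (what is proved, stated in full; the proofs are below) =====
def Claim_equal_draw_check : Prop := ∀ (board : List (List String)), Dom_draw_check board → Pre_draw_check board → Spec_draw_check board (draw_check board)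

-- ===== LEMMAS AND PROOFS =====

-- B's state triple updates componentwise, so the fold splits into three scalar folds
def pvBits (i j : Int) : Int :=
  let bits0 : Int := Int.lor (Int.shiftLeft 1 i.toNat) (Int.shiftLeft 1 (3 + j).toNat)
  let bits1 : Int := if i == j then Int.lor bits0 (Int.shiftLeft 1 (6:Nat)) else bits0
  if i + j == 2 then Int.lor bits1 (Int.shiftLeft 1 (7:Nat)) else bits1

def pvBlStep (board : List (List String)) (a : Int) (i j : Int) : Int :=
  if pvCellB board i j == " " then a + 1 else a
def pvD0Step (board : List (List String)) (m : Int) (i j : Int) : Int :=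
  if !(pvCellB board i j == "0" || pvCellB board i j == " ") then Int.lor m (pvBits i j) else m
def pvDXStep (board : List (List String)) (m : Int) (i j : Int) : Int :=
  if !(pvCellB board i j == "X" || pvCellB board i j == " ") then Int.lor m (pvBits i j) else m

theorem stepB_eta (board : List (List String)) (st : Int × Int × Int) (i j : Int) :
    pvStepB board st i j =
      (pvBlStep board st.1 i j, pvD0Step board st.2.1 i j, pvDXStep board st.2.2 i j) := by
  unfold pvStepB pvBlStep pvD0Step pvDXStep pvBits
  cases hb : (pvCellB board i j == " ") <;>
    cases hz : (pvCellB board i j == "0") <;>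
      cases hx : (pvCellB board i j == "X") <;> simp [hb, hz, hx]

theorem foldl_prod3 {α β γ δ : Type} (f : α → δ → α) (g : β → δ → β) (h : γ → δ → γ) :
    ∀ (l : List δ) (a : α) (b : β) (c : γ),
      l.foldl (fun s x => (f s.1 x, g s.2.1 x, h s.2.2 x)) (a, b, c) =
        (l.foldl f a, l.foldl g b, l.foldl h c) := by
  intro l
  induction l with
  | nil => intro a b c; rfl
  | cons x xs ih => intro a b c; simpa using ih (f a x) (g b x) (h c x)

theorem fold_split (board : List (List String)) (st : Int × Int × Int) :
    ([0,1,2] : List Int).foldl (fun st1 i =>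
        ([0,1,2] : List Int).foldl (fun st2 j => pvStepB board st2 i j) st1) st =
      (([0,1,2] : List Int).foldl (fun a1 i =>
          ([0,1,2] : List Int).foldl (fun a2 j => pvBlStep board a2 i j) a1) st.1,
       ([0,1,2] : List Int).foldl (fun m1 i =>
          ([0,1,2] : List Int).foldl (fun m2 j => pvD0Step board m2 i j) m1) st.2.1,
       ([0,1,2] : List Int).foldl (fun m1 i =>
          ([0,1,2] : List Int).foldl (fun m2 j => pvDXStep board m2 i j) m1) st.2.2) := by
  have hstep : ∀ i : Int, (fun (st2 : Int × Int × Int) j => pvStepB board st2 i j)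
      = (fun (st2 : Int × Int × Int) j => (pvBlStep board st2.1 i j, pvD0Step board st2.2.1 i j, pvDXStep board st2.2.2 i j)) := by
    intro i; funext st2 j; exact stepB_eta board st2 i j
  have hout : (fun (st1 : Int × Int × Int) (i : Int) => ([0,1,2] : List Int).foldl (fun st2 j => pvStepB board st2 i j) st1)
      = (fun (st1 : Int × Int × Int) (i : Int) =>
          (([0,1,2] : List Int).foldl (fun a j => pvBlStep board a i j) st1.1,
           ([0,1,2] : List Int).foldl (fun m j => pvD0Step board m i j) st1.2.1,
           ([0,1,2] : List Int).foldl (fun m j => pvDXStep board m i j) st1.2.2)) := by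
    funext st1 i
    rw [hstep i]
    obtain ⟨a, b, c⟩ := st1
    exact foldl_prod3 (fun a j => pvBlStep board a i j) (fun m j => pvD0Step board m i j)
      (fun m j => pvDXStep board m i j) [0,1,2] a b c
  rw [hout]
  obtain ⟨a, b, c⟩ := st
  exact foldl_prod3 (fun a1 i => ([0,1,2] : List Int).foldl (fun a2 j => pvBlStep board a2 i j) a1)
    (fun m1 i => ([0,1,2] : List Int).foldl (fun m2 j => pvD0Step board m2 i j) m1)
    (fun m1 i => ([0,1,2] : List Int).foldl (fun m2 j => pvDXStep board m2 i j) m1) [0,1,2] a b c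

-- the mask fold as an explicit function of the 9 per-cell "kills this line" booleans
def pvMask9 (a00 a01 a02 a10 a11 a12 a20 a21 a22 : Bool) : Int :=
  let m1 := if a00 then Int.lor (0:Int) (pvBits 0 0) else 0
  let m2 := if a01 then Int.lor m1 (pvBits 0 1) else m1
  let m3 := if a02 then Int.lor m2 (pvBits 0 2) else m2
  let m4 := if a10 then Int.lor m3 (pvBits 1 0) else m3
  let m5 := if a11 then Int.lor m4 (pvBits 1 1) else m4
  let m6 := if a12 then Int.lor m5 (pvBits 1 2) else m5
  let m7 := if a20 then Int.lor m6 (pvBits 2 0) else m6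
  let m8 := if a21 then Int.lor m7 (pvBits 2 1) else m7
  if a22 then Int.lor m8 (pvBits 2 2) else m8

theorem mask_fold_eq (p : Int → Int → Bool) :
    ([0,1,2] : List Int).foldl (fun m1 i =>
        ([0,1,2] : List Int).foldl (fun m2 j => if p i j then Int.lor m2 (pvBits i j) else m2) m1) 0 =
      pvMask9 (p 0 0) (p 0 1) (p 0 2) (p 1 0) (p 1 1) (p 1 2) (p 2 0) (p 2 1) (p 2 2) := rfl

theorem cnt3 (p : Int → Bool) :
    (List.foldl (fun acc i => if p i then acc + 1 else acc) (0:Int) [0,1,2] == 3) =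
      (p 0 && p 1 && p 2) := by
  cases h0 : p 0 <;> cases h1 : p 1 <;> cases h2 : p 2 <;>
    simp [List.foldl, h0, h1, h2]

theorem pvIteOr (c m : Bool) : (if c = true then true else m) = (c || m) := by
  cases c <;> simp

-- an early-return chain over the 8 lines equals the conjunction of their negations
theorem chainEq (u00 u01 u02 u10 u11 u12 u20 u21 u22 r : Bool) :
    (if (u00 && u11 && u22 || u02 && u11 && u20) = true then false
     else if (u00 && u01 && u02 || (u10 && u11 && u12 || (u20 && u21 && u22 || false))) = true then false
     else if (u00 && u10 && u20 || (u01 && u11 && u21 || (u02 && u12 && u22 || false))) = true then false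
     else r) =
    ((!u00 || !u01 || !u02) && (!u10 || !u11 || !u12) && (!u20 || !u21 || !u22) &&
     (!u00 || !u10 || !u20) && (!u01 || !u11 || !u21) && (!u02 || !u12 || !u22) &&
     (!u00 || !u11 || !u22) && (!u02 || !u11 || !u20) && r) := by
  revert u00 u01 u02 u10 u11 u12 u20 u21 u22 r; decide

-- a mask is 255 iff every one of the 8 lines got a kill
theorem mask255 (a00 a01 a02 a10 a11 a12 a20 a21 a22 : Bool) :
    (pvMask9 a00 a01 a02 a10 a11 a12 a20 a21 a22 == 255) =
      ((a00 || a01 || a02) && (a10 || a11 || a12) && (a20 || a21 || a22) &&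
       (a00 || a10 || a20) && (a01 || a11 || a21) && (a02 || a12 || a22) &&
       (a00 || a11 || a22) && (a02 || a11 || a20)) := by
  revert a00 a01 a02 a10 a11 a12 a20 a21 a22; decide

set_option maxHeartbeats 1000000 in
theorem main_eq (board : List (List String)) : draw_check board = draw_check_alt board := by
  have hr : PySem.List.pyRange 0 3 1 = [0, 1, 2] := by decide
  have hAB : pvCellB = pvCellA := rfl
  have h20 : (2:Int) - 0 = 2 := by norm_num
  have h21 : (2:Int) - 1 = 1 := by norm_num
  have h22 : (2:Int) - 2 = 0 := by norm_num
  simp only [draw_check, draw_check_alt, hr]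
  rw [fold_split]
  simp only [pvBlStep, pvD0Step, pvDXStep]
  simp only [mask_fold_eq]
  simp only [pvSymbLoop, hr, hAB, mask255, List.any_cons, List.any_nil]
  simp only [cnt3, h20, h21, h22]
  simp only [chainEq, Bool.and_true]
  rw [pvIteOr]

-- ===== VERDICT (by name: the statement is the Claim_ definition above) =====
theorem draw_check_spec : Claim_equal_draw_check := by
  intro board _hdom _hpre
  unfold Spec_draw_check
  exact main_eq board
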